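-- pv_equiv track=rewrite | github.com/ManuelGehl/ROSALIND-challenges | prefix_suffix_graph/prefix_suffix_graph.py | create_adjacency_list
-- ===== SOURCE A (Python) =====
-- from typing import Dict, Tuple
--
-- def create_adjacency_list(prefix_dict: Dict[str, str], suffix_dict: Dict[str, str]) -> Dict[str, list]:
--     """
--     Create an adjacency list representing the overlap relationships between DNA sequences.
--
--     Parameters:
--     - prefix_dict (Dict[str, str]): A dictionary mapping sequence IDs to their respective prefixes.
--     - suffix_dict (Dict[str, str]): A dictionary mapping sequence IDs to their respective suffixes.
--
--     Returns:
--     - Dict[str, list]: A dictionary mapping sequence IDs to a list of IDs of sequences that overlap.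
--     """
--     adjacency_list = {}
--     # Iterate over suffixes
--     for seq_id_suf, suffix in suffix_dict.items():
--         # Initialize empty list for seq_ids
--         adjacent_ids = []
--         for seq_id_pre, prefix in prefix_dict.items():
--             # Check if seq_id is not the same
--             if seq_id_suf != seq_id_pre:
--                 if suffix == prefix:
--                     adjacent_ids.append(seq_id_pre)
--
--         # Append only hits
--         if adjacent_ids:
--             adjacency_list[seq_id_suf] = adjacent_ids
--
--     return adjacency_list
-- ===== SOURCE B (Python) =====
-- def create_adjacency_list(prefix_dict, suffix_dict):
--     """Hash-index prefixes by value, then look each suffix up once (asymptotically faster than A's nested scan)."""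
--     index = {}
--     for seq_id, prefix in prefix_dict.items():
--         index.setdefault(prefix, []).append(seq_id)
--     adjacency_list = {}
--     for seq_id, suffix in suffix_dict.items():
--         hits = [i for i in index.get(suffix, []) if i != seq_id]
--         if hits:
--             adjacency_list[seq_id] = hits
--     return adjacency_list
-- ===== Notes on version B (the rewrite author's own statement) =====
-- stated objective: faster
-- what changed: Replaces A's nested scan of prefix_dict for every suffix by a dict index built once from prefix value to the ordered list of ids, so each suffix is a single hash lookup (plus self-exclusion).
import Mathlib
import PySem

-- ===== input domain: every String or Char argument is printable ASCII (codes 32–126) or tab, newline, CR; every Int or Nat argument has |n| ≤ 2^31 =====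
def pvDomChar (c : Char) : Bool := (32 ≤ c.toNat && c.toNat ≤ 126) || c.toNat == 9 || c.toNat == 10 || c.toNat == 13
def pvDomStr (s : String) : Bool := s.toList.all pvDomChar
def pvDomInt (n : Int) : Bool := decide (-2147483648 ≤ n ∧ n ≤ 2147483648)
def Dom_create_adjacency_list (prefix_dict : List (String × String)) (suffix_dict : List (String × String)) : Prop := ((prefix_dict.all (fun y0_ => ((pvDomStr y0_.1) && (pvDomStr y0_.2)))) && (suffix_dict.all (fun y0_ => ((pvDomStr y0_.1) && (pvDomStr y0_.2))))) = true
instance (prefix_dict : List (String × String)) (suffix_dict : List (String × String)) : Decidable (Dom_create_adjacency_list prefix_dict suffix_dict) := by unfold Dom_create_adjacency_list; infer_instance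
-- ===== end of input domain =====

-- B replaces A's nested scan over prefix_dict by a one-pass hash index of prefixes by value (asymptotically faster).


-- ===== PORT A =====
def create_adjacency_list (prefix_dict : List (String × String)) (suffix_dict : List (String × String)) : List (String × List String) :=
  (suffix_dict.foldl (fun adj p =>
      let adjacent_ids := prefix_dict.foldl (fun acc q =>
          if p.1 ≠ q.1 then (if p.2 = q.2 then acc ++ [q.1] else acc) else acc) []
      if adjacent_ids ≠ [] then adj.insert p.1 adjacent_ids else adj)
    PySem.Dict.empty).items

-- ===== PORT B =====
def create_adjacency_list_alt (prefix_dict : List (String × String)) (suffix_dict : List (String × String)) : List (String × List String) :=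
  let index := prefix_dict.foldl (fun d q => d.modify q.2 [] (· ++ [q.1])) PySem.Dict.empty
  (suffix_dict.foldl (fun adj p =>
      let hits := (index.getD p.2 []).filter (fun i => i ≠ p.1)
      if hits ≠ [] then adj.insert p.1 hits else adj)
    PySem.Dict.empty).items

-- ===== PRECONDITION & SPEC =====
def Spec_create_adjacency_list (prefix_dict : List (String × String)) (suffix_dict : List (String × String)) (out : List (String × List String)) : Prop := out = create_adjacency_list_alt prefix_dict suffix_dict
instance (prefix_dict : List (String × String)) (suffix_dict : List (String × String)) (out : List (String × List String)) : Decidable (Spec_create_adjacency_list prefix_dict suffix_dict out) := by unfold Spec_create_adjacency_list; infer_instance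

-- ===== CLAIM (what is proved, stated in full; the proofs are below) =====
def Claim_equal_create_adjacency_list : Prop := ∀ (prefix_dict : List (String × String)) (suffix_dict : List (String × String)), Dom_create_adjacency_list prefix_dict suffix_dict → Spec_create_adjacency_list prefix_dict suffix_dict (create_adjacency_list prefix_dict suffix_dict)

-- ===== LEMMAS AND PROOFS =====

-- A's inner append-if loop collects exactly the prefixes equal to the suffix, excluding self.
theorem pvA_inner_eq (prefix_dict : List (String × String)) (id suf : String) (acc : List String) :
    prefix_dict.foldl (fun acc q =>
        if id ≠ q.1 then (if suf = q.2 then acc ++ [q.1] else acc) else acc) acc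
      = acc ++ (prefix_dict.filter (fun q => id ≠ q.1 ∧ suf = q.2)).map (·.1) := by
  induction prefix_dict generalizing acc with
  | nil => simp
  | cons q l ih =>
    simp only [List.foldl_cons, List.filter_cons]
    split_ifs with h1 h2 <;> simp_all [ih]

-- B's index, looked up at suf, holds the ids of all prefixes equal to suf, in order.
theorem pvB_index_eq (prefix_dict : List (String × String)) (suf : String) :
    (prefix_dict.foldl (fun d q => d.modify q.2 [] (· ++ [q.1])) PySem.Dict.empty).getD suf []
      = (prefix_dict.filter (fun q => q.2 == suf)).map (·.1) := by
  have h := PySem.Dict.getD_foldl_modify_append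
    (l := prefix_dict.map (fun q => (q.2, q.1))) (d := PySem.Dict.empty) (c := suf)
  simpa [List.foldl_map, List.filter_map, Function.comp] using h

-- B's per-suffix hit list equals A's inner loop result.
theorem pv_hits_eq (prefix_dict : List (String × String)) (id suf : String) :
    (((prefix_dict.foldl (fun d q => d.modify q.2 [] (· ++ [q.1])) PySem.Dict.empty).getD suf []).filter
        (fun i => i ≠ id))
      = prefix_dict.foldl (fun acc q =>
          if id ≠ q.1 then (if suf = q.2 then acc ++ [q.1] else acc) else acc) [] := by
  rw [pvB_index_eq, pvA_inner_eq, List.filter_map, List.filter_filter]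
  simp only [List.nil_append]
  congr 1
  apply List.filter_congr
  intro q _
  by_cases h1 : id = q.1 <;> by_cases h2 : suf = q.2 <;> simp [h1, h2, BEq.comm] <;> tauto

-- ===== VERDICT (by name: the statement is the Claim_ definition above) =====
theorem create_adjacency_list_spec : Claim_equal_create_adjacency_list := by
  intro prefix_dict suffix_dict _
  unfold Spec_create_adjacency_list create_adjacency_list create_adjacency_list_alt
  congr 2
  funext adj p
  simp only [pv_hits_eq]
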